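-- pv_equiv track=rewrite | github.com/sheersh10/CDC_SIMU | new dataset/placement_simulation_model/placement_simulation.py | is_domain_match
-- ===== SOURCE A (Python) =====
-- from typing import List, Dict, Set, Tuple
--
-- DOMAIN_JOB_ROLE_MAPPING = {
--     'SDE': ['SDE', 'Software', 'Software Development', 'AI engineer / SDE', 'AI Engineer',
--             'System Software Engineer', 'SWE', 'R&D', 'Core'],
--     'Data': ['Data', 'Analyst', 'Data Analyst'],
--     'Quant': ['Quant', 'Quant Analyst', 'Algo-Quants', 'Sales and Trading'],
--     'Finance': ['Finance', 'Analyst', 'Wholesale Strategy'],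
--     'CONSULTING': ['Consulting', 'Consultinig', 'Management Trainee', 'Political Consulting'],
--     'Core_': ['Core', 'R&D', 'Hardware', 'Signal Processing', 'ANALOG', 'DIGITAL',
--               'Electric Vehicle Software', 'EDA', 'Systems'],  # Handles all Core_XX
-- }
--
-- def is_domain_match(student_domains: List[str], job_role: str) -> bool:
--     """Check if student's domain matches the job role"""
--     for domain in student_domains:
--         # Handle Core_XX domains
--         if domain.startswith('Core_'):
--             domain_key = 'Core_'
--         else:
--             domain_key = domain
--
--         if domain_key in DOMAIN_JOB_ROLE_MAPPING:
--             matching_roles = DOMAIN_JOB_ROLE_MAPPING[domain_key]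
--             for role in matching_roles:
--                 if role.lower() in job_role.lower() or job_role.lower() in role.lower():
--                     return True
--
--     return False
-- ===== SOURCE B (Python) =====
-- DOMAIN_JOB_ROLE_MAPPING = {
--     'SDE': ['SDE', 'Software', 'Software Development', 'AI engineer / SDE', 'AI Engineer',
--             'System Software Engineer', 'SWE', 'R&D', 'Core'],
--     'Data': ['Data', 'Analyst', 'Data Analyst'],
--     'Quant': ['Quant', 'Quant Analyst', 'Algo-Quants', 'Sales and Trading'],
--     'Finance': ['Finance', 'Analyst', 'Wholesale Strategy'],
--     'CONSULTING': ['Consulting', 'Consultinig', 'Management Trainee', 'Political Consulting'],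
--     'Core_': ['Core', 'R&D', 'Hardware', 'Signal Processing', 'ANALOG', 'DIGITAL',
--               'Electric Vehicle Software', 'EDA', 'Systems'],  # Handles all Core_XX
-- }
--
-- def is_domain_match(student_domains, job_role):
--     """Inverted traversal: walk the fixed mapping; a mapping entry is active when the
--     student list activates its key (Core_ by prefix, others by exact membership)."""
--     jl = job_role.lower()
--     for key, roles in DOMAIN_JOB_ROLE_MAPPING.items():
--         if key == 'Core_':
--             active = any(d.startswith('Core_') for d in student_domains)
--         else:
--             active = key in student_domains
--         if active:
--             for r in roles:
--                 rl = r.lower()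
--                 if rl in jl or jl in rl:
--                     return True
--     return False
-- ===== Notes on version B (the rewrite author's own statement) =====
-- stated objective: alternative
-- what changed: B inverts the traversal: instead of looping over student_domains and looking each (normalized) domain up in the dict, it walks the fixed DOMAIN_JOB_ROLE_MAPPING items once, decides per entry whether the student list activates its key (Core_ by prefix scan, other keys by exact list membership), and only then runs the substring test on that entry's roles with job_role lowercased once; correct because the match is an existential over (domain, role) pairs and no mapping key other than 'Core_' starts with 'Core_'.
import Mathlib
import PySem

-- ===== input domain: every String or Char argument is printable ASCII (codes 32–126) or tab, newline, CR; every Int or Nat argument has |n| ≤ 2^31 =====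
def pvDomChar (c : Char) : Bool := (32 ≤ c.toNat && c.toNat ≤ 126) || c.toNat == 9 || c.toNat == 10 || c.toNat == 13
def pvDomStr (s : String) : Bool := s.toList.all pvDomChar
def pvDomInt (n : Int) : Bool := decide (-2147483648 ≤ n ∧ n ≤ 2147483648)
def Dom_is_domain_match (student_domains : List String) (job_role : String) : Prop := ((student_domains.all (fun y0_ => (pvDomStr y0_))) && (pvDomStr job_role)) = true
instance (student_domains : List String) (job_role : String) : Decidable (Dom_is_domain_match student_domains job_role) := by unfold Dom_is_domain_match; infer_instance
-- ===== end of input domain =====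

-- B inverts the traversal: it walks the fixed DOMAIN_JOB_ROLE_MAPPING once and asks, per entry,
-- whether the student list activates its key (Core_ by prefix, others by membership) — objective: alternative.

-- The module constant DOMAIN_JOB_ROLE_MAPPING, shared context of both programs (insertion order)
def pvItems : List (String × List String) :=
  [("SDE", ["SDE", "Software", "Software Development", "AI engineer / SDE", "AI Engineer",
            "System Software Engineer", "SWE", "R&D", "Core"]),
   ("Data", ["Data", "Analyst", "Data Analyst"]),
   ("Quant", ["Quant", "Quant Analyst", "Algo-Quants", "Sales and Trading"]),
   ("Finance", ["Finance", "Analyst", "Wholesale Strategy"]),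
   ("CONSULTING", ["Consulting", "Consultinig", "Management Trainee", "Political Consulting"]),
   ("Core_", ["Core", "R&D", "Hardware", "Signal Processing", "ANALOG", "DIGITAL",
              "Electric Vehicle Software", "EDA", "Systems"])]

def pvMap : PySem.Dict String (List String) := PySem.Dict.mk pvItems

-- ===== PORT A =====
-- inner 'for role in matching_roles: if …: return True'
def pvRoleLoop (job_role : String) : List String → Bool
  | [] => false
  | r :: rs =>
    if PySem.Str.isIn (PySem.Str.lower r) (PySem.Str.lower job_role)
       || PySem.Str.isIn (PySem.Str.lower job_role) (PySem.Str.lower r) then true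
    else pvRoleLoop job_role rs

def is_domain_match (student_domains : List String) (job_role : String) : Bool :=
  match student_domains with
  | [] => false
  | domain :: rest =>
    let domain_key := if PySem.Str.startswith domain "Core_" then "Core_" else domain
    match pvMap.get? domain_key with
    | some matching_roles =>
      if pvRoleLoop job_role matching_roles then true else is_domain_match rest job_role
    | none => is_domain_match rest job_role

-- ===== PORT B =====
-- inner 'for r in roles: rl = r.lower(); if rl in jl or jl in rl: return True'
def pvBRoleLoop (jl : String) : List String → Bool
  | [] => false
  | r :: rs =>
    let rl := PySem.Str.lower r
    if PySem.Str.isIn rl jl || PySem.Str.isIn jl rl then true else pvBRoleLoop jl rs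

-- 'active = any(d.startswith('Core_') …)' / 'active = key in student_domains'
def pvActive (student_domains : List String) (key : String) : Bool :=
  if key == "Core_" then student_domains.any (fun d => PySem.Str.startswith d "Core_")
  else student_domains.contains key

-- 'for key, roles in DOMAIN_JOB_ROLE_MAPPING.items(): …'
def pvItemLoop (student_domains : List String) (jl : String) : List (String × List String) → Bool
  | [] => false
  | (key, roles) :: rest =>
    if pvActive student_domains key then
      if pvBRoleLoop jl roles then true else pvItemLoop student_domains jl rest
    else pvItemLoop student_domains jl rest

def is_domain_match_alt (student_domains : List String) (job_role : String) : Bool :=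
  let jl := PySem.Str.lower job_role
  pvItemLoop student_domains jl pvMap.items

-- ===== PRECONDITION & SPEC =====
def Spec_is_domain_match (student_domains : List String) (job_role : String) (out : Bool) : Prop := out = is_domain_match_alt student_domains job_role
instance (student_domains : List String) (job_role : String) (out : Bool) : Decidable (Spec_is_domain_match student_domains job_role out) := by unfold Spec_is_domain_match; infer_instance

-- ===== CLAIM (what is proved, stated in full; the proofs are below) =====
def Claim_equal_is_domain_match : Prop := ∀ (student_domains : List String) (job_role : String), Dom_is_domain_match student_domains job_role → Spec_is_domain_match student_domains job_role (is_domain_match student_domains job_role)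

-- ===== LEMMAS AND PROOFS =====

def pvMatch (jl : String) (r : String) : Bool :=
  PySem.Str.isIn (PySem.Str.lower r) jl || PySem.Str.isIn jl (PySem.Str.lower r)

-- roles contributed by one domain in A
def pvRoles (domain : String) : List String :=
  pvMap.getD (if PySem.Str.startswith domain "Core_" then "Core_" else domain) []

lemma pvRoleLoop_eq_any (job_role : String) (rs : List String) :
    pvRoleLoop job_role rs = rs.any (pvMatch (PySem.Str.lower job_role)) := by
  induction rs with
  | nil => rfl
  | cons r rs ih =>
    have hc : (PySem.Str.isIn (PySem.Str.lower r) (PySem.Str.lower job_role)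
        || PySem.Str.isIn (PySem.Str.lower job_role) (PySem.Str.lower r))
        = pvMatch (PySem.Str.lower job_role) r := rfl
    rw [pvRoleLoop, hc, List.any_cons, ih]
    cases pvMatch (PySem.Str.lower job_role) r <;> simp

lemma pvBRoleLoop_eq_any (jl : String) (rs : List String) :
    pvBRoleLoop jl rs = rs.any (pvMatch jl) := by
  induction rs with
  | nil => rfl
  | cons r rs ih =>
    have hc : (PySem.Str.isIn (PySem.Str.lower r) jl || PySem.Str.isIn jl (PySem.Str.lower r))
        = pvMatch jl r := rfl
    rw [pvBRoleLoop, hc, List.any_cons, ih]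
    cases pvMatch jl r <;> simp

lemma is_domain_match_eq_any (sd : List String) (job : String) :
    is_domain_match sd job =
      sd.any (fun d => (pvRoles d).any (pvMatch (PySem.Str.lower job))) := by
  induction sd with
  | nil => rfl
  | cons d rest ih =>
    rw [is_domain_match, List.any_cons, ih]
    cases hm : pvMap.get? (if PySem.Str.startswith d "Core_" then "Core_" else d) with
    | none =>
      simp only [pvRoles, PySem.Dict.getD, hm, Option.getD_none, List.any_nil, Bool.false_or]
    | some roles =>
      simp only [pvRoles, PySem.Dict.getD, hm, Option.getD_some, pvRoleLoop_eq_any]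
      cases roles.any (pvMatch (PySem.Str.lower job)) <;> simp

lemma pvItemLoop_cons (sd : List String) (jl : String) (k : String) (roles : List String)
    (rest : List (String × List String)) :
    pvItemLoop sd jl ((k, roles) :: rest)
      = ((pvActive sd k && pvBRoleLoop jl roles) || pvItemLoop sd jl rest) := by
  rw [pvItemLoop]
  cases pvActive sd k <;> cases pvBRoleLoop jl roles <;> simp

-- B as a six-way disjunction over the fixed mapping
lemma alt_eq (sd : List String) (job : String) :
    is_domain_match_alt sd job =
      ((pvActive sd "SDE" && (pvRoles "SDE").any (pvMatch (PySem.Str.lower job)))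
      || (pvActive sd "Data" && (pvRoles "Data").any (pvMatch (PySem.Str.lower job)))
      || (pvActive sd "Quant" && (pvRoles "Quant").any (pvMatch (PySem.Str.lower job)))
      || (pvActive sd "Finance" && (pvRoles "Finance").any (pvMatch (PySem.Str.lower job)))
      || (pvActive sd "CONSULTING" && (pvRoles "CONSULTING").any (pvMatch (PySem.Str.lower job)))
      || (pvActive sd "Core_" && (pvRoles "Core_").any (pvMatch (PySem.Str.lower job)))) := by
  have hitems : pvMap.items = pvItems := rfl
  rw [is_domain_match_alt]
  rw [hitems]
  show pvItemLoop sd (PySem.Str.lower job) pvItems = _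
  rw [show pvItems = [("SDE", pvRoles "SDE"), ("Data", pvRoles "Data"), ("Quant", pvRoles "Quant"),
        ("Finance", pvRoles "Finance"), ("CONSULTING", pvRoles "CONSULTING"),
        ("Core_", pvRoles "Core_")] from by decide]
  rw [pvItemLoop_cons, pvItemLoop_cons, pvItemLoop_cons, pvItemLoop_cons, pvItemLoop_cons,
      pvItemLoop_cons]
  simp only [pvBRoleLoop_eq_any, pvItemLoop, Bool.or_false, Bool.or_assoc]

-- one domain's contribution in A, split by which mapping key it activates
lemma roles_any_split (d : String) (p : String → Bool) :
    (pvRoles d).any p =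
      (((d == "SDE") && (pvRoles "SDE").any p)
      || ((d == "Data") && (pvRoles "Data").any p)
      || ((d == "Quant") && (pvRoles "Quant").any p)
      || ((d == "Finance") && (pvRoles "Finance").any p)
      || ((d == "CONSULTING") && (pvRoles "CONSULTING").any p)
      || (PySem.Str.startswith d "Core_" && (pvRoles "Core_").any p)) := by
  by_cases hsw : PySem.Str.startswith d "Core_" = true
  · have h1 : (d == "SDE") = false := by
      cases h : d == "SDE"
      · rfl
      · have hd := eq_of_beq h; subst hd; exact absurd hsw (by decide)
    have h2 : (d == "Data") = false := by
      cases h : d == "Data"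
      · rfl
      · have hd := eq_of_beq h; subst hd; exact absurd hsw (by decide)
    have h3 : (d == "Quant") = false := by
      cases h : d == "Quant"
      · rfl
      · have hd := eq_of_beq h; subst hd; exact absurd hsw (by decide)
    have h4 : (d == "Finance") = false := by
      cases h : d == "Finance"
      · rfl
      · have hd := eq_of_beq h; subst hd; exact absurd hsw (by decide)
    have h5 : (d == "CONSULTING") = false := by
      cases h : d == "CONSULTING"
      · rfl
      · have hd := eq_of_beq h; subst hd; exact absurd hsw (by decide)
    have hroles : pvRoles d = pvRoles "Core_" := by
      unfold pvRoles
      rw [hsw]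
      norm_num
    rw [hroles, h1, h2, h3, h4, h5, hsw]
    simp
  · have hsw' : PySem.Str.startswith d "Core_" = false := by
      cases h : PySem.Str.startswith d "Core_"
      · rfl
      · exact absurd h hsw
    by_cases e1 : d = "SDE"
    · subst e1
      rw [show (("SDE":String) == "SDE") = true from by decide,
          show (("SDE":String) == "Data") = false from by decide,
          show (("SDE":String) == "Quant") = false from by decide,
          show (("SDE":String) == "Finance") = false from by decide,
          show (("SDE":String) == "CONSULTING") = false from by decide,
          show PySem.Str.startswith "SDE" "Core_" = false from by decide]
      simp
    by_cases e2 : d = "Data"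
    · subst e2
      rw [show (("Data":String) == "SDE") = false from by decide,
          show (("Data":String) == "Data") = true from by decide,
          show (("Data":String) == "Quant") = false from by decide,
          show (("Data":String) == "Finance") = false from by decide,
          show (("Data":String) == "CONSULTING") = false from by decide,
          show PySem.Str.startswith "Data" "Core_" = false from by decide]
      simp
    by_cases e3 : d = "Quant"
    · subst e3
      rw [show (("Quant":String) == "SDE") = false from by decide,
          show (("Quant":String) == "Data") = false from by decide,
          show (("Quant":String) == "Quant") = true from by decide,
          show (("Quant":String) == "Finance") = false from by decide,
          show (("Quant":String) == "CONSULTING") = false from by decide,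
          show PySem.Str.startswith "Quant" "Core_" = false from by decide]
      simp
    by_cases e4 : d = "Finance"
    · subst e4
      rw [show (("Finance":String) == "SDE") = false from by decide,
          show (("Finance":String) == "Data") = false from by decide,
          show (("Finance":String) == "Quant") = false from by decide,
          show (("Finance":String) == "Finance") = true from by decide,
          show (("Finance":String) == "CONSULTING") = false from by decide,
          show PySem.Str.startswith "Finance" "Core_" = false from by decide]
      simp
    by_cases e5 : d = "CONSULTING"
    · subst e5
      rw [show (("CONSULTING":String) == "SDE") = false from by decide,
          show (("CONSULTING":String) == "Data") = false from by decide,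
          show (("CONSULTING":String) == "Quant") = false from by decide,
          show (("CONSULTING":String) == "Finance") = false from by decide,
          show (("CONSULTING":String) == "CONSULTING") = true from by decide,
          show PySem.Str.startswith "CONSULTING" "Core_" = false from by decide]
      simp
    · have n1 : "SDE" ≠ d := fun h => e1 h.symm
      have n2 : "Data" ≠ d := fun h => e2 h.symm
      have n3 : "Quant" ≠ d := fun h => e3 h.symm
      have n4 : "Finance" ≠ d := fun h => e4 h.symm
      have n5 : "CONSULTING" ≠ d := fun h => e5 h.symm
      have n6 : "Core_" ≠ d := by
        intro h
        rw [← h] at hsw'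
        exact absurd hsw' (by decide)
      have hget : pvMap.get? d = none := by
        show (PySem.Dict.mk pvItems).get? d = none
        simp only [pvItems, PySem.Dict.get?_mk_cons]
        simp [n1, n2, n3, n4, n5, n6, PySem.Dict.get?]
      have hroles : pvRoles d = [] := by
        unfold pvRoles
        rw [hsw']
        simp [PySem.Dict.getD, hget]
      have b1 : (d == "SDE") = false := beq_eq_false_iff_ne.mpr e1
      have b2 : (d == "Data") = false := beq_eq_false_iff_ne.mpr e2
      have b3 : (d == "Quant") = false := beq_eq_false_iff_ne.mpr e3
      have b4 : (d == "Finance") = false := beq_eq_false_iff_ne.mpr e4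
      have b5 : (d == "CONSULTING") = false := beq_eq_false_iff_ne.mpr e5
      rw [hroles, b1, b2, b3, b4, b5, hsw']
      simp

-- distributing 'any' over the six-way split
lemma any_or6 (l : List String) (f g : String → Bool) :
    (l.any fun x => f x || g x) = (l.any f || l.any g) := by
  induction l with
  | nil => rfl
  | cons x xs ih =>
    simp only [List.any_cons, ih]
    cases f x <;> cases g x <;> simp [Bool.or_comm]

lemma any_and_const (l : List String) (f : String → Bool) (b : Bool) :
    (l.any fun x => f x && b) = (l.any f && b) := by
  cases b <;> simp

lemma any_split (sd : List String) (m1 m2 m3 m4 m5 m6 : Bool) :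
    sd.any (fun d =>
        ((d == "SDE") && m1) || ((d == "Data") && m2) || ((d == "Quant") && m3)
        || ((d == "Finance") && m4) || ((d == "CONSULTING") && m5)
        || (PySem.Str.startswith d "Core_" && m6))
      = ((sd.any (fun d => d == "SDE") && m1)
        || (sd.any (fun d => d == "Data") && m2)
        || (sd.any (fun d => d == "Quant") && m3)
        || (sd.any (fun d => d == "Finance") && m4)
        || (sd.any (fun d => d == "CONSULTING") && m5)
        || (sd.any (fun d => PySem.Str.startswith d "Core_") && m6)) := by
  simp only [any_or6, any_and_const]

lemma active_eq_any (sd : List String) (k : String) (hk : (k == "Core_") = false) :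
    pvActive sd k = sd.any (fun d => d == k) := by
  simp only [pvActive, hk, Bool.false_eq_true, if_false]
  induction sd with
  | nil => rfl
  | cons d rest ih => simp only [List.contains_cons, List.any_cons, ih, Bool.beq_comm]

lemma A_eq_split (sd : List String) (p : String → Bool) :
    sd.any (fun d => (pvRoles d).any p)
      = ((sd.any (fun d => d == "SDE") && (pvRoles "SDE").any p)
        || (sd.any (fun d => d == "Data") && (pvRoles "Data").any p)
        || (sd.any (fun d => d == "Quant") && (pvRoles "Quant").any p)
        || (sd.any (fun d => d == "Finance") && (pvRoles "Finance").any p)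
        || (sd.any (fun d => d == "CONSULTING") && (pvRoles "CONSULTING").any p)
        || (sd.any (fun d => PySem.Str.startswith d "Core_") && (pvRoles "Core_").any p)) := by
  generalize hm1 : (pvRoles "SDE").any p = m1
  generalize hm2 : (pvRoles "Data").any p = m2
  generalize hm3 : (pvRoles "Quant").any p = m3
  generalize hm4 : (pvRoles "Finance").any p = m4
  generalize hm5 : (pvRoles "CONSULTING").any p = m5
  generalize hm6 : (pvRoles "Core_").any p = m6
  rw [show (fun d => (pvRoles d).any p) = (fun d =>
      ((d == "SDE") && m1) || ((d == "Data") && m2) || ((d == "Quant") && m3)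
      || ((d == "Finance") && m4) || ((d == "CONSULTING") && m5)
      || (PySem.Str.startswith d "Core_" && m6)) from funext fun d => by
    rw [roles_any_split, hm1, hm2, hm3, hm4, hm5, hm6]]
  exact any_split sd m1 m2 m3 m4 m5 m6

-- ===== VERDICT (by name: the statement is the Claim_ definition above) =====
theorem is_domain_match_spec : Claim_equal_is_domain_match := by
  intro sd job _
  unfold Spec_is_domain_match
  rw [is_domain_match_eq_any, alt_eq, A_eq_split]
  rw [active_eq_any sd "SDE" (by decide), active_eq_any sd "Data" (by decide),
      active_eq_any sd "Quant" (by decide), active_eq_any sd "Finance" (by decide),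
      active_eq_any sd "CONSULTING" (by decide)]
  have hc : pvActive sd "Core_" = sd.any (fun d => PySem.Str.startswith d "Core_") := by
    simp [pvActive]
  rw [hc]
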